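-- pv_equiv track=rewrite | github.com/graemester/wireguard-friend | v-alpha/src/peer_manager.py | _extract_interface_section
-- ===== SOURCE A (Python) =====
-- def _extract_interface_section(config_text: str) -> str:
--     """Extract [Interface] section from config (legacy method)"""
--     lines = []
--     in_interface = False
--
--     for line in config_text.split('\n'):
--         if line.strip().startswith('[Interface]'):
--             in_interface = True
--             lines.append(line)
--         elif in_interface:
--             if line.strip().startswith('[Peer]'):
--                 # End of Interface section
--                 break
--             lines.append(line)
--
--     return '\n'.join(lines).rstrip()
-- ===== SOURCE B (Python) =====
-- def _extract_interface_section(config_text: str) -> str: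
--     lines = config_text.split('\n')
--     start = next((i for i, l in enumerate(lines)
--                   if l.strip().startswith('[Interface]')), None)
--     if start is None:
--         return ''
--     end = next((j for j in range(start + 1, len(lines))
--                 if lines[j].strip().startswith('[Peer]')), len(lines))
--     return '\n'.join(lines[start:end]).rstrip()
-- ===== Notes on version B (the rewrite author's own statement) =====
-- stated objective: alternative
-- what changed: B locates the index of the first [Interface] line and of the first following [Peer] line, then slices the lines list once, instead of A's single stateful scan with an in_interface flag and break.
import Mathlib
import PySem

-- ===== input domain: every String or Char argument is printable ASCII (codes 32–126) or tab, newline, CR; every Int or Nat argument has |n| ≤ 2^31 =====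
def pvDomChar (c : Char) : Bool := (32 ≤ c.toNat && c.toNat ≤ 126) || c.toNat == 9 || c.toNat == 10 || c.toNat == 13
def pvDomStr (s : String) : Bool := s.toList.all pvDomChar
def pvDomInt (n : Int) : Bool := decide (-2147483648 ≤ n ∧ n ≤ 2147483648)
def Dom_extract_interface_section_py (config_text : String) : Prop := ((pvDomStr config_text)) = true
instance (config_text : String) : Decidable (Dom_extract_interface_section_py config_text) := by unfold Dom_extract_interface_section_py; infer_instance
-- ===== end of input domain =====

-- B replaces A's stateful in_interface/break scan by finding the two boundary
-- indices and slicing the lines list (alternative decomposition, same cost).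

-- line.strip().startswith('[Interface]') / ('[Peer]') — shared by both Pythons verbatim
def pvIsInterface (l : String) : Bool := PySem.Str.startswith (PySem.Str.strip l) "[Interface]"
def pvIsPeer (l : String) : Bool := PySem.Str.startswith (PySem.Str.strip l) "[Peer]"

-- ===== PORT A =====
-- the for-loop of A, with state (in_interface, lines); returning acc models `break`
def pvLoopA : List String → Bool → List String → List String
  | [], _, acc => acc
  | l :: rest, inI, acc =>
    if pvIsInterface l then pvLoopA rest true (acc ++ [l])
    else if inI then
      (if pvIsPeer l then acc else pvLoopA rest true (acc ++ [l]))
    else pvLoopA rest inI acc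

def extract_interface_section_py (config_text : String) : String :=
  -- split('\n') with a nonempty separator never raises: split? is some here
  PySem.Str.rstrip (PySem.Str.join "\n"
    (pvLoopA ((PySem.Str.split? config_text "\n").getD []) false []))

-- ===== PORT B =====
-- the `next(... range(start+1, len(lines)) ...)` scan of Source B
def pvStopB (lines : List String) (start : Nat) : Nat :=
  match (lines.drop (start + 1)).findIdx? pvIsPeer with
  | some k => start + 1 + k
  | none => lines.length

def extract_interface_section_py_alt (config_text : String) : String :=
  let lines := (PySem.Str.split? config_text "\n").getD []
  match lines.findIdx? pvIsInterface with
  | none => ""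
  | some start =>
    PySem.Str.rstrip (PySem.Str.join "\n"
      (PySem.List.slice lines (some (start : Int)) (some ((pvStopB lines start : Nat) : Int))))

-- ===== PRECONDITION & SPEC =====
def Spec_extract_interface_section_py (config_text : String) (out : String) : Prop := out = extract_interface_section_py_alt config_text
instance (config_text : String) (out : String) : Decidable (Spec_extract_interface_section_py config_text out) := by unfold Spec_extract_interface_section_py; infer_instance

-- ===== CLAIM (what is proved, stated in full; the proofs are below) =====
def Claim_equal_extract_interface_section_py : Prop := ∀ (config_text : String), Dom_extract_interface_section_py config_text → Spec_extract_interface_section_py config_text (extract_interface_section_py config_text)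

-- ===== LEMMAS AND PROOFS =====

-- a line starting (after strip) with "[Interface]" does not start with "[Peer]"
theorem pvIsPeer_of_isInterface {l : String} (h : pvIsInterface l = true) :
    pvIsPeer l = false := by
  unfold pvIsInterface at h
  unfold pvIsPeer
  rw [PySem.Str.startswith_eq, PySem.Chars.startswith_iff] at h
  rw [PySem.Str.startswith_eq]
  by_contra hne
  rw [Bool.not_eq_false, PySem.Chars.startswith_iff] at hne
  have hi : "[Interface]".toList = ['[','I','n','t','e','r','f','a','c','e',']'] := rfl
  have hp : "[Peer]".toList = ['[','P','e','e','r',']'] := rfl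
  rw [hi] at h; rw [hp] at hne
  rcases List.prefix_or_prefix_of_prefix h hne with hpre | hpre
  · exact absurd hpre (by decide)
  · exact absurd hpre (by decide)

-- A's loop once in_interface is true: take lines until the first [Peer] line
theorem pvLoopA_true (rest : List String) : ∀ acc,
    pvLoopA rest true acc = acc ++ rest.takeWhile (fun l => !pvIsPeer l) := by
  induction rest with
  | nil => simp [pvLoopA]
  | cons l rs ih =>
    intro acc
    by_cases hI : pvIsInterface l = true
    · simp [pvLoopA, hI, ih, pvIsPeer_of_isInterface hI]
    · by_cases hP : pvIsPeer l = true <;>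
        simp [pvLoopA, hI, hP, ih]

-- takeWhile (!pvIsPeer) in terms of the first index where pvIsPeer holds
theorem pvTakeWhile_of_none {xs : List String}
    (h : xs.findIdx? pvIsPeer = none) :
    xs.takeWhile (fun l => !pvIsPeer l) = xs := by
  rw [List.findIdx?_eq_none_iff] at h
  rw [List.takeWhile_eq_self_iff]
  intro x hx
  simp [h x hx]

theorem pvTakeWhile_of_some {xs : List String} : ∀ {k : Nat},
    xs.findIdx? pvIsPeer = some k →
    xs.takeWhile (fun l => !pvIsPeer l) = xs.take k := by
  induction xs with
  | nil => intro k h; simp at h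
  | cons x xs ih =>
    intro k h
    rw [List.findIdx?_cons] at h
    by_cases hP : pvIsPeer x = true
    · rw [if_pos hP] at h
      cases h
      simp [hP]
    · rw [if_neg hP] at h
      cases hk : xs.findIdx? pvIsPeer with
      | none => rw [hk] at h; simp at h
      | some k' =>
        rw [hk] at h
        simp only [Option.map_some, Option.some.injEq] at h
        subst h
        simp [hP, ih hk]

-- core equality, no-[Interface] case: A's loop collects nothing
theorem pvCore_none : ∀ (lines : List String),
    lines.findIdx? pvIsInterface = none → pvLoopA lines false [] = [] := by
  intro lines h
  rw [List.findIdx?_eq_none_iff] at h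
  induction lines with
  | nil => rfl
  | cons l rest ih =>
    have hl : pvIsInterface l = false := h l (by simp)
    rw [pvLoopA]
    simp only [hl, Bool.false_eq_true, if_false]
    exact ih (fun x hx => h x (by simp [hx]))

-- shifting both boundaries by one past a cons leaves the slice unchanged
theorem pvSlice_cons_succ (x : String) (xs : List String) (a b : Nat) :
    PySem.List.slice (x :: xs) (some ((a + 1 : Nat) : Int)) (some ((b + 1 : Nat) : Int)) =
    PySem.List.slice xs (some (a : Int)) (some (b : Int)) := by
  rw [PySem.List.slice_natCast, PySem.List.slice_natCast]
  simp only [List.drop_succ_cons]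
  congr 1
  omega

-- B's end boundary past a cons
theorem pvStopB_cons (l : String) (rest : List String) (s : Nat) :
    pvStopB (l :: rest) (s + 1) = pvStopB rest s + 1 := by
  unfold pvStopB
  simp only [List.drop_succ_cons, List.length_cons]
  cases hk : (rest.drop (s + 1)).findIdx? pvIsPeer <;> simp
  omega

-- core equality, found case: A's loop = B's boundary slice
theorem pvCore_some : ∀ (lines : List String) (s : Nat),
    lines.findIdx? pvIsInterface = some s →
    pvLoopA lines false [] =
      PySem.List.slice lines (some (s : Int)) (some ((pvStopB lines s : Nat) : Int)) := by
  intro lines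
  induction lines with
  | nil => intro s h; simp at h
  | cons l rest ih =>
    intro s h
    rw [List.findIdx?_cons] at h
    by_cases hI : pvIsInterface l = true
    · rw [if_pos hI] at h
      cases h
      rw [pvLoopA, if_pos hI, pvLoopA_true]
      unfold pvStopB
      simp only [List.drop_succ_cons, List.drop_zero]
      cases hk : rest.findIdx? pvIsPeer with
      | none =>
        simp only [Nat.cast_zero, PySem.List.slice_zero_start,
          PySem.List.slice_to_natCast]
        simp [pvTakeWhile_of_none hk]
      | some k =>
        simp only [Nat.cast_zero, PySem.List.slice_zero_start,
          PySem.List.slice_to_natCast]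
        rw [pvTakeWhile_of_some hk]
        simp [show 0 + 1 + k = k + 1 by omega, List.take_succ_cons]
    · rw [if_neg hI] at h
      cases hs : rest.findIdx? pvIsInterface with
      | none => rw [hs] at h; simp at h
      | some s' =>
        rw [hs] at h
        simp only [Option.map_some, Option.some.injEq] at h
        subst h
        have hl : pvIsInterface l = false := by simpa using hI
        have hA : pvLoopA (l :: rest) false [] = pvLoopA rest false [] := by
          rw [pvLoopA]; simp [hl]
        rw [hA, ih s' hs, pvStopB_cons]
        exact (pvSlice_cons_succ l rest s' (pvStopB rest s')).symm

-- ===== VERDICT (by name: the statement is the Claim_ definition above) =====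
theorem extract_interface_section_py_spec : Claim_equal_extract_interface_section_py := by
  intro config_text _
  unfold Spec_extract_interface_section_py extract_interface_section_py
    extract_interface_section_py_alt
  cases h : ((PySem.Str.split? config_text "\n").getD []).findIdx? pvIsInterface with
  | none => rw [pvCore_none _ h]; simp only [h]; rfl
  | some s => rw [pvCore_some _ s h]; simp only [h]
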